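-- pv_equiv track=rewrite | github.com/doogle-oss/leetcode | arrays/sort_colors.py | validate_sorted_colors
-- ===== SOURCE A (Python) =====
-- from typing import List
--
-- def validate_sorted_colors(arr: List[int]) -> bool:
--     """
--     Validate if array is properly sorted with 0s, 1s, 2s.
--
--     Args:
--         arr: Array to validate
--
--     Returns:
--         bool: True if properly sorted
--     """
--     if not arr:
--         return True
--
--     # Check if all elements are 0, 1, or 2
--     if not all(x in [0, 1, 2] for x in arr):
--         return False
--
--     # Check if sorted: all 0s, then all 1s, then all 2s
--     prev = -1
--     for num in arr:
--         if num < prev: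
--             return False
--         prev = num
--
--     return True
-- ===== SOURCE B (Python) =====
-- from typing import List
--
-- def validate_sorted_colors(arr: List[int]) -> bool:
--     return all(x in (0, 1, 2) for x in arr) and arr == sorted(arr)
-- ===== Notes on version B (the rewrite author's own statement) =====
-- stated objective: idiomatic
-- what changed: Replaces the explicit prev-tracking scan (and the separate empty guard) with the sort-and-compare idiom arr == sorted(arr) after the membership check.
import Mathlib
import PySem

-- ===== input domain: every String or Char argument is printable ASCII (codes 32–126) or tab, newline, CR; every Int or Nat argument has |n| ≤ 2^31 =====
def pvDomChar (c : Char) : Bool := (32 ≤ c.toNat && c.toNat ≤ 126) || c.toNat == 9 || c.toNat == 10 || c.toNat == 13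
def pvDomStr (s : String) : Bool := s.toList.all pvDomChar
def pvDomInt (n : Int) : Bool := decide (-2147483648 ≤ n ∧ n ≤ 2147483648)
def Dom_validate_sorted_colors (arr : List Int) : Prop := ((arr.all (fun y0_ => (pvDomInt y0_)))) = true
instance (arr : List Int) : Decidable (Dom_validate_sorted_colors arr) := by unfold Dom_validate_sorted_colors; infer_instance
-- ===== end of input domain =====

-- B replaces A's prev-tracking linear scan (and its separate empty guard) by the
-- idiomatic sort-and-compare `arr == sorted(arr)` after the membership check (objective: idiomatic).

-- ===== PORT A =====
-- the `prev = -1; for num in arr: if num < prev: return False; prev = num` loop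
def vscLoop : Int → List Int → Bool
  | _, [] => true
  | prev, num :: rest => if num < prev then false else vscLoop num rest

def validate_sorted_colors (arr : List Int) : Bool :=
  if arr = [] then true
  else if !(arr.all fun x => x == 0 || x == 1 || x == 2) then false
  else vscLoop (-1) arr

-- ===== PORT B =====
def validate_sorted_colors_alt (arr : List Int) : Bool :=
  (arr.all fun x => x == 0 || x == 1 || x == 2)
    && (arr == PySem.List.sorted arr (fun x => x) false)

-- ===== PRECONDITION & SPEC =====
def Spec_validate_sorted_colors (arr : List Int) (out : Bool) : Prop := out = validate_sorted_colors_alt arr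
instance (arr : List Int) (out : Bool) : Decidable (Spec_validate_sorted_colors arr out) := by unfold Spec_validate_sorted_colors; infer_instance

-- ===== CLAIM (what is proved, stated in full; the proofs are below) =====
def Claim_equal_validate_sorted_colors : Prop := ∀ (arr : List Int), Dom_validate_sorted_colors arr → Spec_validate_sorted_colors arr (validate_sorted_colors arr)

-- ===== LEMMAS AND PROOFS =====

-- A's scan starting from `prev` accepts exactly the ≤-chains from `prev`.
theorem vscLoop_iff_chain (l : List Int) : ∀ prev : Int,
    vscLoop prev l = true ↔ List.IsChain (· ≤ ·) (prev :: l) := by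
  induction l with
  | nil => intro prev; simp [vscLoop]
  | cons n t ih =>
      intro prev
      simp only [vscLoop, List.isChain_cons_cons]
      by_cases h : n < prev
      · simp only [if_pos h]
        simp; omega
      · simp only [if_neg h, ih n]
        simp; omega

-- a ≤-chain from -1 over a nonempty list is the same as pairwise nondecreasing, once the head is ≥ -1
theorem chain_neg1_iff (h : Int) (t : List Int) (hh : -1 ≤ h) :
    List.IsChain (· ≤ ·) ((-1) :: h :: t) ↔ (h :: t).Pairwise (· ≤ ·) := by
  rw [List.isChain_cons_cons]
  constructor
  · rintro ⟨-, hc⟩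
    exact List.isChain_iff_pairwise.mp hc
  · intro hp
    exact ⟨hh, List.isChain_iff_pairwise.mpr hp⟩

-- `arr == sorted(arr)` holds exactly for nondecreasing lists
theorem pairwise_iff_eq_sorted (arr : List Int) :
    arr.Pairwise (· ≤ ·) ↔ arr = PySem.List.sorted arr (fun x => x) false := by
  constructor
  · intro hp
    exact (PySem.List.sorted_eq_self_of_pairwise arr (fun x => x) (by simpa using hp)).symm
  · intro h
    have hs := PySem.List.sorted_pairwise (xs := arr) (key := fun x : Int => x)
    rw [← h] at hs
    simpa using hs

-- ===== VERDICT (by name: the statement is the Claim_ definition above) =====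
theorem validate_sorted_colors_spec : Claim_equal_validate_sorted_colors := by
  intro arr _
  show validate_sorted_colors arr = validate_sorted_colors_alt arr
  unfold validate_sorted_colors validate_sorted_colors_alt
  by_cases hnil : arr = []
  · subst hnil; decide
  · simp only [hnil, if_false]
    by_cases hall : (arr.all fun x => x == 0 || x == 1 || x == 2) = true
    · simp only [hall, Bool.not_true, Bool.true_and, Bool.false_eq_true, if_false]
      obtain ⟨h, t, rfl⟩ := List.exists_cons_of_ne_nil hnil
      have hh : -1 ≤ h := by
        have := List.all_eq_true.mp hall h (by simp)
        revert this; simp; omega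
      rw [Bool.eq_iff_iff, vscLoop_iff_chain, chain_neg1_iff h t hh,
        pairwise_iff_eq_sorted, beq_iff_eq]
    · simp [hall]
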